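-- pv_equiv track=rewrite | github.com/m-saparov/Python-Dictionary | task22.py | group_students
-- ===== SOURCE A (Python) =====
-- def group_students(students: list[dict[str, str]]) -> dict[str, list[str]]:
--     groups: dict[str, list[str]] = {}
--
--     for student in students:
--         name = student["name"]
--         group = student["group"]
--
--         if group not in groups:
--             groups[group] = []
--
--         groups[group].append(name)
--
--     return groups
-- ===== SOURCE B (Python) =====
-- def group_students(students: list[dict[str, str]]) -> dict[str, list[str]]:
--     order = list(dict.fromkeys(s["group"] for s in students))
--     return {g: [s["name"] for s in students if s["group"] == g] for g in order}
-- ===== Notes on version B (the rewrite author's own statement) =====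
-- stated objective: simpler
-- what changed: Replaces the single-pass dict-of-lists accumulation with a two-phase declarative form: ordered dedup of the group keys (dict.fromkeys) followed by one filtering comprehension per group.
import Mathlib
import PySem

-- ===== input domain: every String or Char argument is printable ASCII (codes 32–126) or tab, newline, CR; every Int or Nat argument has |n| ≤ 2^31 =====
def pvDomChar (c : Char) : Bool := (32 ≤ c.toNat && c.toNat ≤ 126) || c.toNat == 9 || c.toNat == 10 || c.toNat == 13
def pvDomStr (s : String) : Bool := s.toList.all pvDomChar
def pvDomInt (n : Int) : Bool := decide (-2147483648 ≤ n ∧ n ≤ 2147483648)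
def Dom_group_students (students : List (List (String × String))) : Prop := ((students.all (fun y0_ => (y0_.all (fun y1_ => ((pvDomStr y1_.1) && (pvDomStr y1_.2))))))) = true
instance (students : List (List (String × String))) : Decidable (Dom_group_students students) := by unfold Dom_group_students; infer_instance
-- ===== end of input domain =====

-- B replaces A's single-pass dict-of-lists accumulation by an ordered dedup of the group
-- keys followed by one filtering pass per group (simpler, not faster).

-- ===== PORT A =====
-- A: one loop, a dict of lists; groups[group] created on first sight, then name appended.
def group_students (students : List (List (String × String))) : List (String × List String) :=
  (students.foldl (fun groups student =>
      let name := (PySem.Dict.get? (PySem.Dict.mk student) "name").getD ""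
      let group := (PySem.Dict.get? (PySem.Dict.mk student) "group").getD ""
      let groups := if groups.contains group then groups else groups.insert group []
      groups.modify group [] (fun l => l ++ [name])
    ) PySem.Dict.empty).items

-- ===== PORT B =====
-- B: order = list(dict.fromkeys(groups)); then one filtering comprehension per group.
def group_students_alt (students : List (List (String × String))) : List (String × List String) :=
  let order := PySem.List.dedup (students.map (fun s => (PySem.Dict.get? (PySem.Dict.mk s) "group").getD ""))
  order.map (fun g => (g,
    (students.filter (fun s => (PySem.Dict.get? (PySem.Dict.mk s) "group").getD "" == g)).map
      (fun s => (PySem.Dict.get? (PySem.Dict.mk s) "name").getD "")))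

-- ===== PRECONDITION & SPEC =====
-- Pre_ excludes exactly the inputs where some student dict lacks a "name" or "group" key:
-- there both A and B raise KeyError.
def Pre_group_students (students : List (List (String × String))) : Prop :=
  ∀ s ∈ students, (PySem.Dict.get? (PySem.Dict.mk s) "name").isSome = true ∧
                  (PySem.Dict.get? (PySem.Dict.mk s) "group").isSome = true
instance (students : List (List (String × String))) : Decidable (Pre_group_students students) := by
  unfold Pre_group_students; infer_instance
def pvWitness_group_students : (List (List (String × String))) :=
  [[("name", "Ann"), ("group", "A1")], [("name", "Bob"), ("group", "A1")]]

def Spec_group_students (students : List (List (String × String))) (out : List (String × List String)) : Prop := out = group_students_alt students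
instance (students : List (List (String × String))) (out : List (String × List String)) : Decidable (Spec_group_students students out) := by unfold Spec_group_students; infer_instance

-- ===== CLAIM (what is proved, stated in full; the proofs are below) =====
def Claim_equal_group_students : Prop := ∀ (students : List (List (String × String))), Dom_group_students students → Pre_group_students students → Spec_group_students students (group_students students)

-- ===== LEMMAS AND PROOFS =====

-- A's "if group not in groups: groups[group] = []" followed by the append is exactly one Dict.modify.
theorem step_eq_modify (d : PySem.Dict String (List String)) (g n : String) :
    (if d.contains g then d else d.insert g []).modify g [] (fun l => l ++ [n]) =
      d.modify g [] (fun l => l ++ [n]) := by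
  by_cases h : d.contains g = true
  · simp [h]
  · have hc : d.contains g = false := by simpa using h
    simp [h, PySem.Dict.modify, PySem.Dict.getD_insert_self, PySem.Dict.insert_insert_self,
      PySem.Dict.getD_of_not_contains d ([] : List String) hc]

-- A = B on every input (the ports are total; the Python programs raise outside Pre_).
theorem ports_agree (students : List (List (String × String))) :
    group_students students = group_students_alt students := by
  have hf : (fun (groups : PySem.Dict String (List String)) student =>
      let name := (PySem.Dict.get? (PySem.Dict.mk student) "name").getD ""
      let group := (PySem.Dict.get? (PySem.Dict.mk student) "group").getD ""
      let groups := if groups.contains group then groups else groups.insert group []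
      groups.modify group [] (fun l => l ++ [name])) =
      (fun (d : PySem.Dict String (List String)) s =>
        d.modify ((PySem.Dict.get? (PySem.Dict.mk s) "group").getD "") []
          (fun l => l ++ [(PySem.Dict.get? (PySem.Dict.mk s) "name").getD ""])) := by
    funext d s
    exact step_eq_modify d _ _
  unfold group_students
  rw [hf]
  rw [← List.foldl_map
        (f := fun s => ((PySem.Dict.get? (PySem.Dict.mk s) "group").getD "",
                        (PySem.Dict.get? (PySem.Dict.mk s) "name").getD ""))
        (g := fun (d : PySem.Dict String (List String)) p =>
                d.modify p.1 [] (fun l => l ++ [p.2]))]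
  have hnd := PySem.Dict.nodup_keys_foldl_modify_key
      (students.map (fun s => ((PySem.Dict.get? (PySem.Dict.mk s) "group").getD "",
                               (PySem.Dict.get? (PySem.Dict.mk s) "name").getD "")))
      (fun (p : String × String) => p.1) []
      (fun d (p : String × String) (l : List String) => l ++ [p.2])
      PySem.Dict.empty (by simp [PySem.Dict.keys_empty])
  rw [PySem.Dict.items_eq_map_keys _ hnd []]
  rw [PySem.Dict.keys_foldl_modify_key
      (students.map (fun s => ((PySem.Dict.get? (PySem.Dict.mk s) "group").getD "",
                               (PySem.Dict.get? (PySem.Dict.mk s) "name").getD "")))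
      (fun (p : String × String) => p.1) []
      (fun d (p : String × String) (l : List String) => l ++ [p.2])]
  unfold group_students_alt
  simp only [PySem.List.dedup_eq_ofList, PySem.Dict.keys_empty, PySem.Set.update_nil_left,
    List.map_map]
  apply List.map_congr_left
  intro g hg
  rw [PySem.Dict.getD_foldl_modify_append]
  simp only [PySem.Dict.getD_empty, List.nil_append, List.filter_map, List.map_map]
  rfl

-- ===== VERDICT (by name: the statement is the Claim_ definition above) =====
theorem group_students_spec : Claim_equal_group_students := by
  intro students _ _
  exact ports_agree students
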